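-- pv_equiv track=rewrite | github.com/krzyswys/Polish-worldle-solver | main.py | getWordListWithLettersAtIndexes
-- ===== SOURCE A (Python) =====
-- def getWordListWithLettersAtIndexes(f, s, t, fr, fh, wordList):
--     newWordList = []
--     for el in wordList:
--         c = 0
--         if f != "-":
--             if el[2][0] == f:
--                 c += 1
--         else:
--             c += 1
--         if s != "-":
--             if el[2][1] == s:
--                 c += 1
--         else:
--             c += 1
--         if t != "-":
--             if el[2][2] == t:
--                 c += 1
--         else:
--             c += 1
--         if fr != "-":
--             if el[2][3] == fr:
--                 c += 1
--         else:
--             c += 1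
--         if fh != "-":
--             if el[2][4] == fh:
--                 c += 1
--         else:
--             c += 1
--         if c == 5:
--             newWordList.append(el)
--     return newWordList
-- ===== SOURCE B (Python) =====
-- def getWordListWithLettersAtIndexes(f, s, t, fr, fh, wordList):
--     # Staged filtering: apply each active constraint as its own pass over a
--     # shrinking candidate list, instead of testing all five slots per word.
--     candidates = list(wordList)
--     for i, ch in enumerate((f, s, t, fr, fh)):
--         if ch != "-":
--             candidates = [el for el in candidates if el[2][i] == ch]
--     return candidates
-- ===== Notes on version B (the rewrite author's own statement) =====
-- stated objective: simpler
-- what changed: B filters in stages: it folds over the five (index, letter) slots and, for each non-'-' constraint, makes a separate pass narrowing a candidate list, instead of A's single pass over words with five hardcoded branch blocks accumulating a counter to 5.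
import Mathlib
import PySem

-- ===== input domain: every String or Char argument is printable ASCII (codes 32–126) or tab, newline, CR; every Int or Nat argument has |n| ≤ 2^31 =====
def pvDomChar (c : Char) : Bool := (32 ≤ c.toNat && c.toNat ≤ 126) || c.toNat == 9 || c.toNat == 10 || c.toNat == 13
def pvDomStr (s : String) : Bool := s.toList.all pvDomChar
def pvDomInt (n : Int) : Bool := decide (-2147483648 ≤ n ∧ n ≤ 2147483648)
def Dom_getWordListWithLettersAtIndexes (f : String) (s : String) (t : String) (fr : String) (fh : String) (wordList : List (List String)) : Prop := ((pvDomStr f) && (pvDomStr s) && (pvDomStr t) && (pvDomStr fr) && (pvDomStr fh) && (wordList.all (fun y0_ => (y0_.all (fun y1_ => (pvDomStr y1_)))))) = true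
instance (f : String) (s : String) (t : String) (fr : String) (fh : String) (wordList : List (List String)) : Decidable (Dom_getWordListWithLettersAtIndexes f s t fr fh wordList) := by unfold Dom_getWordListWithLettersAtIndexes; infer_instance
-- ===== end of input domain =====

-- B filters in stages — one narrowing pass over the candidate list per active (index, letter)
-- constraint — instead of A's single pass with five hardcoded counter branches (objective: simpler).

-- ===== PORT A =====
-- el[2][i] as a one-character string; "" only where Python would raise IndexError (outside Pre_)
def pvCharA (el : List String) (i : Int) : String :=
  match PySem.List.pyGet? el 2 with
  | some w =>
    match PySem.Str.pyGet? w i with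
    | some c => String.ofList [c]
    | none => ""
  | none => ""

def getWordListWithLettersAtIndexes (f : String) (s : String) (t : String) (fr : String) (fh : String) (wordList : List (List String)) : List (List String) :=
  wordList.foldl (fun newWordList el =>
    let c : Int := 0
    let c := if f ≠ "-" then (if pvCharA el 0 = f then c + 1 else c) else c + 1
    let c := if s ≠ "-" then (if pvCharA el 1 = s then c + 1 else c) else c + 1
    let c := if t ≠ "-" then (if pvCharA el 2 = t then c + 1 else c) else c + 1
    let c := if fr ≠ "-" then (if pvCharA el 3 = fr then c + 1 else c) else c + 1
    let c := if fh ≠ "-" then (if pvCharA el 4 = fh then c + 1 else c) else c + 1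
    if c = 5 then newWordList ++ [el] else newWordList) []

-- ===== PORT B =====
-- el[2][i] as a one-character string; "" only where Python would raise IndexError (outside Pre_)
def pvCharB (el : List String) (i : Int) : String :=
  match PySem.List.pyGet? el 2 with
  | some w =>
    match PySem.Str.pyGet? w i with
    | some c => String.ofList [c]
    | none => ""
  | none => ""

def getWordListWithLettersAtIndexes_alt (f : String) (s : String) (t : String) (fr : String) (fh : String) (wordList : List (List String)) : List (List String) :=
  (PySem.List.enumerate [f, s, t, fr, fh]).foldl
    (fun candidates p =>
      if p.2 ≠ "-" then candidates.filter (fun el => pvCharB el p.1 == p.2) else candidates)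
    wordList

-- ===== PRECONDITION & SPEC =====
-- Pre_ excludes exactly the inputs where Python A raises IndexError: a word entry el with a
-- constrained position but el shorter than 3, or el[2] shorter than the constrained index + 1.
def Pre_getWordListWithLettersAtIndexes (f : String) (s : String) (t : String) (fr : String) (fh : String) (wordList : List (List String)) : Prop :=
  ∀ el ∈ wordList,
    (f ≠ "-" → 2 < el.length ∧ 0 < (el.getD 2 "").toList.length) ∧
    (s ≠ "-" → 2 < el.length ∧ 1 < (el.getD 2 "").toList.length) ∧
    (t ≠ "-" → 2 < el.length ∧ 2 < (el.getD 2 "").toList.length) ∧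
    (fr ≠ "-" → 2 < el.length ∧ 3 < (el.getD 2 "").toList.length) ∧
    (fh ≠ "-" → 2 < el.length ∧ 4 < (el.getD 2 "").toList.length)
instance (f : String) (s : String) (t : String) (fr : String) (fh : String) (wordList : List (List String)) : Decidable (Pre_getWordListWithLettersAtIndexes f s t fr fh wordList) := by unfold Pre_getWordListWithLettersAtIndexes; infer_instance

def pvWitness_getWordListWithLettersAtIndexes : String × String × String × String × String × List (List String) :=
  ("a", "-", "-", "-", "b", [["ala", "cat", "abcab"], ["x", "y", "zzzzz"]])

def Spec_getWordListWithLettersAtIndexes (f : String) (s : String) (t : String) (fr : String) (fh : String) (wordList : List (List String)) (out : List (List String)) : Prop := out = getWordListWithLettersAtIndexes_alt f s t fr fh wordList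
instance (f : String) (s : String) (t : String) (fr : String) (fh : String) (wordList : List (List String)) (out : List (List String)) : Decidable (Spec_getWordListWithLettersAtIndexes f s t fr fh wordList out) := by unfold Spec_getWordListWithLettersAtIndexes; infer_instance

-- ===== CLAIM (what is proved, stated in full; the proofs are below) =====
def Claim_equal_getWordListWithLettersAtIndexes : Prop := ∀ (f : String) (s : String) (t : String) (fr : String) (fh : String) (wordList : List (List String)), Dom_getWordListWithLettersAtIndexes f s t fr fh wordList → Pre_getWordListWithLettersAtIndexes f s t fr fh wordList → Spec_getWordListWithLettersAtIndexes f s t fr fh wordList (getWordListWithLettersAtIndexes f s t fr fh wordList)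

-- ===== LEMMAS AND PROOFS =====

-- proof-side name for A's per-word counter
def pvCountA (f s t fr fh : String) (el : List String) : Int :=
  let c : Int := 0
  let c := if f ≠ "-" then (if pvCharA el 0 = f then c + 1 else c) else c + 1
  let c := if s ≠ "-" then (if pvCharA el 1 = s then c + 1 else c) else c + 1
  let c := if t ≠ "-" then (if pvCharA el 2 = t then c + 1 else c) else c + 1
  let c := if fr ≠ "-" then (if pvCharA el 3 = fr then c + 1 else c) else c + 1
  let c := if fh ≠ "-" then (if pvCharA el 4 = fh then c + 1 else c) else c + 1
  c

lemma pv_bridgeA (f s t fr fh : String) (wl : List (List String)) :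
    getWordListWithLettersAtIndexes f s t fr fh wl
      = wl.foldl (fun acc el => if pvCountA f s t fr fh el = 5 then acc ++ [el] else acc) [] := rfl

-- B's staged folds collapse to one filter by the conjunction of the active constraints
lemma pv_stages (cs : List (Int × String)) (wl : List (List String)) :
    cs.foldl (fun candidates p =>
        if p.2 ≠ "-" then candidates.filter (fun el => pvCharB el p.1 == p.2) else candidates) wl
      = wl.filter (fun el => cs.all (fun p => p.2 == "-" || pvCharB el p.1 == p.2)) := by
  induction cs generalizing wl with
  | nil => simp
  | cons p cs ih =>
    rw [List.foldl_cons]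
    by_cases h : p.2 = "-"
    · rw [if_neg (by simp [h]), ih]
      simp [h]
    · rw [if_pos h, ih, List.filter_filter]
      have hb : (p.2 == "-") = false := by simp [h]
      simp only [List.all_cons, hb, Bool.false_or]
      exact List.filter_congr fun a _ => Bool.and_comm _ _

lemma pv_point (f s t fr fh : String) (el : List String) :
    (pvCountA f s t fr fh el = 5)
      ↔ ((PySem.List.enumerate [f, s, t, fr, fh]).all
            (fun p => p.2 == "-" || pvCharB el p.1 == p.2)) = true := by
  have hB : pvCharB = pvCharA := rfl
  by_cases hf : f = "-" <;> by_cases hs : s = "-" <;> by_cases ht : t = "-" <;>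
    by_cases hfr : fr = "-" <;> by_cases hfh : fh = "-" <;>
    simp only [pvCountA, PySem.List.enumerate, hB, hf, hs, ht, hfr, hfh] <;>
    simp [hf, hs, ht, hfr, hfh] <;>
    split_ifs <;> simp_all

-- ===== VERDICT (by name: the statement is the Claim_ definition above) =====
theorem getWordListWithLettersAtIndexes_spec : Claim_equal_getWordListWithLettersAtIndexes := by
  intro f s t fr fh wl _hdom _hpre
  unfold Spec_getWordListWithLettersAtIndexes getWordListWithLettersAtIndexes_alt
  rw [pv_bridgeA, pv_stages]
  have hfun : (fun (acc : List (List String)) el => if pvCountA f s t fr fh el = 5 then acc ++ [el] else acc)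
      = (fun acc x => if ((PySem.List.enumerate [f, s, t, fr, fh]).all
            (fun p => p.2 == "-" || pvCharB x p.1 == p.2)) = true then acc ++ [id x] else acc) := by
    funext acc el
    by_cases h : ((PySem.List.enumerate [f, s, t, fr, fh]).all
        (fun p => p.2 == "-" || pvCharB el p.1 == p.2)) = true
    · rw [if_pos ((pv_point f s t fr fh el).mpr h), if_pos h, id]
    · have hc : ¬ pvCountA f s t fr fh el = 5 := fun hc => h ((pv_point f s t fr fh el).mp hc)
      rw [if_neg hc, if_neg h]
  rw [hfun, PySem.List.foldl_append_if _ id]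
  simp
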